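-- pv_equiv track=rewrite | github.com/jampat000/Fetcher | app/refiner_compare_present.py | group_ordered_counts
-- ===== SOURCE A (Python) =====
-- def group_ordered_counts(items: list[str]) -> list[tuple[str, int]]:
--     """First-seen order; merge identical stripped labels with running counts."""
--     ordered: list[str] = []
--     index: dict[str, int] = {}
--     counts: list[int] = []
--     for raw in items:
--         label = raw.strip()
--         if not label:
--             continue
--         if label not in index:
--             index[label] = len(ordered)
--             ordered.append(label)
--             counts.append(0)
--         counts[index[label]] += 1
--     return [(ordered[i], counts[i]) for i in range(len(ordered))]
-- ===== SOURCE B (Python) =====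
-- def group_ordered_counts(items: list[str]) -> list[tuple[str, int]]:
--     """First-seen order; merge identical stripped labels with running counts."""
--     labels = [s for s in (raw.strip() for raw in items) if s]
--     counts = {}
--     for label in labels:
--         counts[label] = counts.get(label, 0) + 1
--     out = []
--     seen = set()
--     for label in labels:
--         if label not in seen:
--             seen.add(label)
--             out.append((label, counts[label]))
--     return out
-- ===== Notes on version B (the rewrite author's own statement) =====
-- stated objective: alternative
-- what changed: A's single interleaved pass maintaining three parallel structures (ordered list, position dict, mutable counts list) is replaced by a clean-labels-once / build-full-count-table / dedup-in-first-seen-order decomposition with a seen set.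
import Mathlib
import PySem

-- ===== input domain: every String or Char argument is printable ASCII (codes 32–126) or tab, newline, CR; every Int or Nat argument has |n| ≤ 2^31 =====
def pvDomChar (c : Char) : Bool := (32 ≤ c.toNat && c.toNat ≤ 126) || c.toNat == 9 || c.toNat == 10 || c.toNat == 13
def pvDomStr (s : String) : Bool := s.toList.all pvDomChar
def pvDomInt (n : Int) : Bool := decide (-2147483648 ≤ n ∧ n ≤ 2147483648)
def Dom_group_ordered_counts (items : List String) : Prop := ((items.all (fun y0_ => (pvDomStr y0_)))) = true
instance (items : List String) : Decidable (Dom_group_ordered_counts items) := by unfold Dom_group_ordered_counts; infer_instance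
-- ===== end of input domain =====

-- B replaces A's single interleaved pass over three parallel structures by a
-- clean-labels / count-table / first-seen-dedup decomposition (objective: alternative; same cost).

-- ===== PORT A =====
-- one loop step of A: strip, skip empties, register new labels, bump counts[index[label]]
def group_ordered_counts_step (st : List String × PySem.Dict String Int × List Int)
    (raw : String) : List String × PySem.Dict String Int × List Int :=
  let label := PySem.Str.strip raw
  if label = "" then st
  else
    let st' :=
      if st.2.1.contains label then st
      else (st.1 ++ [label], st.2.1.insert label (st.1.length : Int), st.2.2 ++ [(0 : Int)])
    -- counts[index[label]] += 1 : index stores only in-range non-negative positions, so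
    -- getD / pyGetD / pySetD are exact here (no KeyError/IndexError is reachable)
    let i := st'.2.1.getD label 0
    (st'.1, st'.2.1, PySem.List.pySetD st'.2.2 i (PySem.List.pyGetD st'.2.2 i 0 + 1))

def group_ordered_counts (items : List String) : List (String × Int) :=
  let st := items.foldl group_ordered_counts_step ([], PySem.Dict.empty, [])
  -- [(ordered[i], counts[i]) for i in range(len(ordered))] : i is in range, pyGetD exact
  (List.range st.1.length).map (fun (i : Nat) =>
    (PySem.List.pyGetD st.1 ((i : Nat) : Int) "", PySem.List.pyGetD st.2.2 ((i : Nat) : Int) 0))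

-- ===== PORT B =====
def group_ordered_counts_alt (items : List String) : List (String × Int) :=
  let labels := (items.map PySem.Str.strip).filter (fun s => !(s == ""))
  let counts := labels.foldl (fun (d : PySem.Dict String Int) l => d.insert l (d.getD l 0 + 1))
    PySem.Dict.empty
  -- counts[label] : label ∈ labels so the key is present, getD is exact here
  (labels.foldl (fun (st : List (String × Int) × PySem.Set String) l =>
      if st.2.contains l then st
      else (st.1 ++ [(l, counts.getD l 0)], st.2.add l)) ([], PySem.Set.empty)).1

-- ===== PRECONDITION & SPEC =====
def Spec_group_ordered_counts (items : List String) (out : List (String × Int)) : Prop := out = group_ordered_counts_alt items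
instance (items : List String) (out : List (String × Int)) : Decidable (Spec_group_ordered_counts items out) := by unfold Spec_group_ordered_counts; infer_instance

-- ===== CLAIM (what is proved, stated in full; the proofs are below) =====
def Claim_equal_group_ordered_counts : Prop := ∀ (items : List String), Dom_group_ordered_counts items → Spec_group_ordered_counts items (group_ordered_counts items)

-- ===== LEMMAS AND PROOFS =====

-- skipping elements the fold ignores
theorem foldl_skip {β : Type} (g : β → String → β) (h : ∀ s, g s "" = s) :
    ∀ (l : List String) (i : β), l.foldl g i = (l.filter (fun s => !(s == ""))).foldl g i := by
  intro l
  induction l with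
  | nil => intro i; rfl
  | cons x xs ih =>
    intro i
    by_cases hx : x = ""
    · subst hx; simp [List.foldl_cons, h, ih]
    · simp [List.foldl_cons, hx, ih]

-- the index dict A builds, as a function of the clean label list
def dIdx (C : List String) : PySem.Dict String Int :=
  C.foldl (fun d x => if d.contains x then d else d.insert x (d.size : Int)) PySem.Dict.empty

theorem dIdx_snoc (C : List String) (x : String) :
    dIdx (C ++ [x]) =
      if (dIdx C).contains x then dIdx C else (dIdx C).insert x ((dIdx C).size : Int) := by
  simp [dIdx, List.foldl_append]

theorem dIdx_props (C : List String) :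
    (∀ x, (dIdx C).contains x = decide (x ∈ C)) ∧
    (dIdx C).size = (PySem.Set.ofList C).length ∧
    (∀ x ∈ C, (dIdx C).getD x 0 = (List.idxOf x (PySem.Set.ofList C) : Int)) := by
  induction C using List.reverseRecOn with
  | nil => refine ⟨by simp [dIdx], by simp [dIdx, PySem.Set.ofList_nil], by simp⟩
  | append_singleton C x ih =>
    obtain ⟨hc, hs, hg⟩ := ih
    by_cases hx : x ∈ C
    · have hcx : (dIdx C).contains x = true := by rw [hc]; simp [hx]
      have hd : dIdx (C ++ [x]) = dIdx C := by rw [dIdx_snoc, hcx]; simp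
      have ho : PySem.Set.ofList (C ++ [x]) = PySem.Set.ofList C := by
        rw [PySem.Set.ofList_append_singleton, PySem.Set.add_of_mem]
        rw [PySem.Set.mem_ofList]; exact hx
      refine ⟨?_, ?_, ?_⟩
      · intro y; rw [hd, hc]; by_cases hy : y = x
        · subst hy; simp [hx]
        · simp [List.mem_append, hy]
      · rw [hd, ho]; exact hs
      · intro y hy; rw [hd, ho]
        rcases List.mem_append.mp hy with h | h
        · exact hg y h
        · simp at h; subst h; exact hg _ hx
    · have hcx : (dIdx C).contains x = false := by rw [hc]; simp [hx]
      have hd : dIdx (C ++ [x]) = (dIdx C).insert x ((dIdx C).size : Int) := by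
        rw [dIdx_snoc, hcx]; simp
      have hxo : x ∉ PySem.Set.ofList C := by rw [PySem.Set.mem_ofList]; exact hx
      have ho : PySem.Set.ofList (C ++ [x]) = PySem.Set.ofList C ++ [x] := by
        rw [PySem.Set.ofList_append_singleton, PySem.Set.add_of_not_mem hxo]
      refine ⟨?_, ?_, ?_⟩
      · intro y; rw [hd, PySem.Dict.contains_insert, hc]
        by_cases hy : y = x
        · subst hy; simp
        · simp [List.mem_append, (by exact fun h => hy h : y = x → False)]
      · rw [hd, ho, PySem.Dict.size_insert, hcx]
        simp [hs]
      · intro y hy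
        rw [hd, ho, PySem.Dict.getD_insert]
        by_cases hy' : y = x
        · subst hy'
          rw [if_pos rfl, List.idxOf_append_of_notMem hxo]
          simp [hs]
        · rw [if_neg hy']
          have hyC : y ∈ C := by
            rcases List.mem_append.mp hy with h | h
            · exact h
            · simp at h; exact absurd h hy'
          rw [hg y hyC, List.idxOf_append_of_mem]
          rw [PySem.Set.mem_ofList]; exact hyC

-- bump one entry of a mapped counts vector at the idxOf position
theorem map_set_idxOf {O : List String} (hnd : O.Nodup) {x : String} (hx : x ∈ O)
    (f : String → Int) (v : Int) :
    (O.map f).set (List.idxOf x O) v = O.map (fun l => if l = x then v else f l) := by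
  apply List.ext_getElem
  · simp
  · intro j h1 h2
    have hj : j < O.length := by simpa using h2
    have hi : List.idxOf x O < O.length := List.idxOf_lt_length_of_mem hx
    rw [List.getElem_set]
    by_cases hji : List.idxOf x O = j
    · have hOj : O[j] = x := by
        subst hji; exact List.getElem_idxOf hi
      simp [hji, hOj]
    · have hne : O[j] ≠ x := by
        intro hEq
        apply hji
        have := hnd.idxOf_getElem j hj
        rw [hEq] at this
        exact this
      rw [if_neg hji]
      simp [hne]

-- characterisation of A's fold over the clean label list
theorem A_fold_char (C : List String) (hC : "" ∉ C) :
    C.foldl (fun st label =>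
        if label = "" then st
        else
          let st' :=
            if st.2.1.contains label then st
            else (st.1 ++ [label], st.2.1.insert label (st.1.length : Int), st.2.2 ++ [(0 : Int)])
          let i := st'.2.1.getD label 0
          (st'.1, st'.2.1, PySem.List.pySetD st'.2.2 i (PySem.List.pyGetD st'.2.2 i 0 + 1)))
      ([], PySem.Dict.empty, []) =
      (PySem.Set.ofList C, dIdx C,
        (PySem.Set.ofList C).map (fun l => (C.count l : Int))) := by
  induction C using List.reverseRecOn with
  | nil => simp [dIdx, PySem.Set.ofList_nil]
  | append_singleton C x ih =>
    have hC' : "" ∉ C := fun h => hC (List.mem_append.mpr (Or.inl h))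
    have hx : x ≠ "" := by
      intro h; exact hC (List.mem_append.mpr (Or.inr (by simp [h])))
    obtain ⟨hc, hs, hg⟩ := dIdx_props C
    rw [List.foldl_append, ih hC', List.foldl_cons, List.foldl_nil]
    simp only [if_neg hx]
    by_cases hmem : x ∈ C
    · have hcx : (dIdx C).contains x = true := by rw [hc]; simp [hmem]
      have hxo : x ∈ PySem.Set.ofList C := by rw [PySem.Set.mem_ofList]; exact hmem
      have ho : PySem.Set.ofList (C ++ [x]) = PySem.Set.ofList C := by
        rw [PySem.Set.ofList_append_singleton, PySem.Set.add_of_mem hxo]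
      have hd : dIdx (C ++ [x]) = dIdx C := by rw [dIdx_snoc, hcx]; simp
      have hi : List.idxOf x (PySem.Set.ofList C) < (PySem.Set.ofList C).length :=
        List.idxOf_lt_length_of_mem hxo
      simp only [hcx, if_true, hg x hmem, ho, hd, PySem.List.pySetD_natCast,
        PySem.List.pyGetD_natCast]
      refine Prod.ext rfl (Prod.ext rfl ?_)
      have hlen : List.idxOf x (PySem.Set.ofList C) <
          ((PySem.Set.ofList C).map (fun l => (C.count l : Int))).length := by
        simpa using hi
      rw [List.getD_eq_getElem _ _ hlen, List.getElem_map, List.getElem_idxOf hi]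
      rw [map_set_idxOf (PySem.Set.nodup_ofList C) hxo]
      apply List.map_congr_left
      intro l _
      by_cases hlx : l = x
      · subst hlx
        simp [List.count_append]
      · have : x ≠ l := fun h => hlx h.symm
        simp [List.count_append, hlx, this]
    · have hcx : (dIdx C).contains x = false := by rw [hc]; simp [hmem]
      have hxo : x ∉ PySem.Set.ofList C := by rw [PySem.Set.mem_ofList]; exact hmem
      have ho : PySem.Set.ofList (C ++ [x]) = PySem.Set.ofList C ++ [x] := by
        rw [PySem.Set.ofList_append_singleton, PySem.Set.add_of_not_mem hxo]
      have hd : dIdx (C ++ [x]) = (dIdx C).insert x ((PySem.Set.ofList C).length : Int) := by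
        rw [dIdx_snoc, hcx]; simp [hs]
      have hKlen : ((PySem.Set.ofList C).map (fun l => (C.count l : Int))).length =
          (PySem.Set.ofList C).length := by simp
      simp only [hcx, Bool.false_eq_true, if_false, PySem.Dict.getD_insert_self,
        PySem.List.pySetD_natCast, PySem.List.pyGetD_natCast, ho, hd]
      have hget : ((PySem.Set.ofList C).map (fun l => (C.count l : Int)) ++ [(0 : Int)]).getD
          (PySem.Set.ofList C).length 0 = 0 := by
        rw [List.getD_eq_getElem _ _ (by simp [hKlen])]
        simp [List.getElem_append_right, hKlen]
      have hset : ((PySem.Set.ofList C).map (fun l => (C.count l : Int)) ++ [(0 : Int)]).set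
          (PySem.Set.ofList C).length (0 + 1) =
          (PySem.Set.ofList C).map (fun l => (C.count l : Int)) ++ [(1 : Int)] := by
        rw [List.set_append]
        simp [hKlen]
      rw [hget, hset, List.map_append]
      simp only [Prod.mk.injEq]
      refine ⟨trivial, trivial, ?_⟩
      congr 1
      · apply List.map_congr_left
        intro l hl
        have hlx : l ≠ x := fun h => hxo (h ▸ hl)
        have : x ≠ l := fun h => hlx h.symm
        simp [List.count_append, this]
      · have : C.count x = 0 := List.count_eq_zero.mpr hmem
        simp [List.count_append, this]

theorem A_char (items : List String) :
    group_ordered_counts items =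
      (PySem.Set.ofList ((items.map PySem.Str.strip).filter (fun s => !(s == "")))).map
        (fun l =>
          (l, (((items.map PySem.Str.strip).filter (fun s => !(s == ""))).count l : Int))) := by
  unfold group_ordered_counts
  have hstep : items.foldl group_ordered_counts_step ([], PySem.Dict.empty, []) =
      (items.map PySem.Str.strip).foldl (fun st label =>
        if label = "" then st
        else
          let st' :=
            if st.2.1.contains label then st
            else (st.1 ++ [label], st.2.1.insert label (st.1.length : Int), st.2.2 ++ [(0 : Int)])
          let i := st'.2.1.getD label 0
          (st'.1, st'.2.1, PySem.List.pySetD st'.2.2 i (PySem.List.pyGetD st'.2.2 i 0 + 1)))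
        ([], PySem.Dict.empty, []) := by
    rw [List.foldl_map]
    rfl
  have hskip := foldl_skip (β := List String × PySem.Dict String Int × List Int)
    (fun st label =>
        if label = "" then st
        else
          let st' :=
            if st.2.1.contains label then st
            else (st.1 ++ [label], st.2.1.insert label (st.1.length : Int), st.2.2 ++ [(0 : Int)])
          let i := st'.2.1.getD label 0
          (st'.1, st'.2.1, PySem.List.pySetD st'.2.2 i (PySem.List.pyGetD st'.2.2 i 0 + 1)))
    (by intro s; simp) (items.map PySem.Str.strip) ([], PySem.Dict.empty, [])
  have hnc : "" ∉ (items.map PySem.Str.strip).filter (fun s => !(s == "")) := by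
    intro h
    have := List.of_mem_filter h
    simp at this
  rw [hstep, hskip, A_fold_char _ hnc]
  set C := (items.map PySem.Str.strip).filter (fun s => !(s == "")) with hCdef
  set O := PySem.Set.ofList C with hOdef
  apply List.ext_getElem
  · simp
  · intro j h1 h2
    have hj : j < O.length := by simpa using h2
    have hr : j < (List.range O.length).length := by simpa using hj
    rw [List.getElem_map, List.getElem_range]
    rw [List.getElem_map]
    refine Prod.ext ?_ ?_
    · simp only [PySem.List.pyGetD_natCast]
      rw [List.getD_eq_getElem _ _ hj]
    · simp only [PySem.List.pyGetD_natCast]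
      rw [List.getD_eq_getElem _ _ (by simpa using hj), List.getElem_map]

theorem B_fold (counts : PySem.Dict String Int) (L : List String) :
    L.foldl (fun (st : List (String × Int) × PySem.Set String) l =>
        if st.2.contains l then st
        else (st.1 ++ [(l, counts.getD l 0)], st.2.add l)) ([], PySem.Set.empty) =
      ((PySem.Set.ofList L).map (fun l => (l, counts.getD l 0)), PySem.Set.ofList L) := by
  induction L using List.reverseRecOn with
  | nil => simp [PySem.Set.ofList_nil]
  | append_singleton L x ih =>
    rw [List.foldl_append, ih, List.foldl_cons, List.foldl_nil]
    by_cases hx : x ∈ L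
    · have hxo : x ∈ PySem.Set.ofList L := by rw [PySem.Set.mem_ofList]; exact hx
      rw [PySem.Set.ofList_append_singleton, PySem.Set.add_of_mem hxo]
      simp [hx]
    · have hxo : x ∉ PySem.Set.ofList L := by rw [PySem.Set.mem_ofList]; exact hx
      rw [PySem.Set.ofList_append_singleton, PySem.Set.add_of_not_mem hxo]
      simp [hx]

theorem B_char (items : List String) :
    group_ordered_counts_alt items =
      (PySem.Set.ofList ((items.map PySem.Str.strip).filter (fun s => !(s == "")))).map
        (fun l =>
          (l, (((items.map PySem.Str.strip).filter (fun s => !(s == ""))).count l : Int))) := by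
  unfold group_ordered_counts_alt
  simp only [PySem.Dict.foldl_insert_getD_add_one_eq_counter]
  rw [B_fold]
  simp [PySem.Dict.getD_counter]

-- ===== VERDICT (by name: the statement is the Claim_ definition above) =====
theorem group_ordered_counts_spec : Claim_equal_group_ordered_counts := by
  intro items _
  unfold Spec_group_ordered_counts
  rw [A_char, B_char]
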